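-- pv_equiv track=rewrite | github.com/stevensshi/kaggle-jane-street-2024 | src/neural_network.py | find_sequence_groups
-- ===== SOURCE A (Python) =====
-- def find_sequence_groups(symbol_ids, date_ids):
--     """Find (start, end) indices for each (symbol, date) group.
--
--     Data must be sorted by (symbol_id, date_id, time_id).
--     """
--     n = len(symbol_ids)
--     groups = []
--     start = 0
--     for i in range(1, n):
--         if symbol_ids[i] != symbol_ids[i - 1] or date_ids[i] != date_ids[i - 1]:
--             groups.append((start, i))
--             start = i
--     groups.append((start, n))
--     return groups
-- ===== SOURCE B (Python) =====
-- def find_sequence_groups(symbol_ids, date_ids):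
--     """Find (start, end) indices for each (symbol, date) group.
--
--     Data must be sorted by (symbol_id, date_id, time_id).
--     """
--     n = len(symbol_ids)
--     groups = []
--     start = 0
--     while True:
--         j = start + 1
--         while j < n and symbol_ids[j] == symbol_ids[start] and date_ids[j] == date_ids[start]:
--             j += 1
--         if j >= n:
--             groups.append((start, n))
--             return groups
--         groups.append((start, j))
--         start = j
-- ===== Notes on version B (the rewrite author's own statement) =====
-- stated objective: alternative
-- what changed: B detects each group in its own inner scan that compares elements against the group's first element (the head) and emits one interval per outer iteration, instead of A's single flat loop over adjacent pairs threading a running start.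
import Mathlib
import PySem

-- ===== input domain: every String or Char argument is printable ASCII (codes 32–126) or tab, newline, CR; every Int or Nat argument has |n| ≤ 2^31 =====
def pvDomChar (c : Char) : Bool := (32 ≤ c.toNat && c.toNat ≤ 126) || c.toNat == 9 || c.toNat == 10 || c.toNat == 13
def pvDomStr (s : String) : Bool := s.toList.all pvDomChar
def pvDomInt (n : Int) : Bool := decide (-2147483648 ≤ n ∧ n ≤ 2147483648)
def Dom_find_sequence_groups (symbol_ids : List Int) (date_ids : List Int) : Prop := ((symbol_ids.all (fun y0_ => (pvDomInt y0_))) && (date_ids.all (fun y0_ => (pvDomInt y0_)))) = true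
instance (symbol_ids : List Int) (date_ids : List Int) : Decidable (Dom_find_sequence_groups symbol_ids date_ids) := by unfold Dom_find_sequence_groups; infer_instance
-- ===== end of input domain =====

-- B finds each group with an inner scan comparing against the group's head element and emits
-- one interval per outer iteration, instead of A's flat adjacent-pair loop; same O(n) cost
-- (objective: alternative decomposition).

-- ===== PORT A =====
-- Literal port of A: one fold over range(1, n) carrying (groups, start), then the final group.
def find_sequence_groups (symbol_ids : List Int) (date_ids : List Int) : List (Int × Int) :=
  let n : Int := symbol_ids.length
  let r := (PySem.List.pyRange 1 n 1).foldl
    (fun (acc : List (Int × Int) × Int) i =>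
      if (PySem.List.pyGet? symbol_ids i != PySem.List.pyGet? symbol_ids (i - 1)) ||
         (PySem.List.pyGet? date_ids i != PySem.List.pyGet? date_ids (i - 1)) then
        (acc.1 ++ [(acc.2, i)], i)
      else acc)
    ([], 0)
  r.1 ++ [(r.2, n)]

-- ===== PORT B =====
-- Source B's inner while loop: advance j while j < n and the element at j equals the group head.
def pvInner (s d : List Int) (n start j : Int) : Int :=
  if h : j < n then
    if (PySem.List.pyGet? s j == PySem.List.pyGet? s start) &&
       (PySem.List.pyGet? d j == PySem.List.pyGet? d start) then
      pvInner s d n start (j + 1)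
    else j
  else j
termination_by (n - j).toNat
decreasing_by omega

-- pvInner never moves backwards (needed for pvOuter's termination)
lemma pvInner_ge (s d : List Int) (n start : Int) : ∀ j, j ≤ pvInner s d n start j := by
  intro j
  rw [pvInner]
  split
  · split
    · have := pvInner_ge s d n start (j + 1)
      omega
    · exact le_refl j
  · exact le_refl j
termination_by j => (n - j).toNat
decreasing_by omega

-- Source B's outer while-True loop carrying (groups, start).
def pvOuter (s d : List Int) (n : Int) (groups : List (Int × Int)) (start : Int) :
    List (Int × Int) :=
  let j := pvInner s d n start (start + 1)
  if j ≥ n then groups ++ [(start, n)]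
  else pvOuter s d n (groups ++ [(start, j)]) j
termination_by (n - start).toNat
decreasing_by
  have := pvInner_ge s d n start (start + 1)
  omega

def find_sequence_groups_alt (symbol_ids : List Int) (date_ids : List Int) : List (Int × Int) :=
  let n : Int := symbol_ids.length
  pvOuter symbol_ids date_ids n [] 0

-- ===== PRECONDITION & SPEC =====
-- Pre_ excludes exactly the inputs on which Python A raises IndexError: a position i ≥ 1
-- where the symbols repeat (so the short-circuit 'or' evaluates date_ids[i]) but
-- date_ids is shorter than i + 1.
def Pre_find_sequence_groups (symbol_ids : List Int) (date_ids : List Int) : Prop :=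
  ((List.range symbol_ids.length).all fun i =>
    i == 0 || symbol_ids[i]? != symbol_ids[i - 1]? || decide (i < date_ids.length)) = true
instance (symbol_ids : List Int) (date_ids : List Int) : Decidable (Pre_find_sequence_groups symbol_ids date_ids) := by unfold Pre_find_sequence_groups; infer_instance
def pvWitness_find_sequence_groups : List Int × List Int := ([1, 1, 2], [5, 5, 5])

def Spec_find_sequence_groups (symbol_ids : List Int) (date_ids : List Int) (out : List (Int × Int)) : Prop := out = find_sequence_groups_alt symbol_ids date_ids
instance (symbol_ids : List Int) (date_ids : List Int) (out : List (Int × Int)) : Decidable (Spec_find_sequence_groups symbol_ids date_ids out) := by unfold Spec_find_sequence_groups; infer_instance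

-- ===== CLAIM (what is proved, stated in full; the proofs are below) =====
def Claim_equal_find_sequence_groups : Prop := ∀ (symbol_ids : List Int) (date_ids : List Int), Dom_find_sequence_groups symbol_ids date_ids → Pre_find_sequence_groups symbol_ids date_ids → Spec_find_sequence_groups symbol_ids date_ids (find_sequence_groups symbol_ids date_ids)

-- ===== LEMMAS AND PROOFS =====

-- The inner-loop continuation condition at index k.
def pvCond (s d : List Int) (start k : Int) : Bool :=
  (PySem.List.pyGet? s k == PySem.List.pyGet? s start) &&
  (PySem.List.pyGet? d k == PySem.List.pyGet? d start)

-- pvInner skips over a prefix of indices on which the condition holds.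
lemma pvInner_skip (s d : List Int) (n start : Int) :
    ∀ (m : Nat) (j1 j2 : Int), (j2 - j1).toNat = m → j1 ≤ j2 →
      (∀ k, j1 ≤ k → k < j2 → k < n ∧ pvCond s d start k = true) →
      pvInner s d n start j1 = pvInner s d n start j2 := by
  intro m
  induction m with
  | zero =>
    intro j1 j2 hm hle _
    have h : j1 = j2 := by omega
    subst h
    rfl
  | succ m ih =>
    intro j1 j2 hm hle hcond
    have hlt : j1 < j2 := by omega
    have h1 := hcond j1 (le_refl _) hlt
    rw [pvInner, dif_pos h1.1]
    have hc := h1.2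
    unfold pvCond at hc
    rw [if_pos hc]
    exact ih (j1 + 1) j2 (by omega) (by omega) (fun k hk1 hk2 => hcond k (by omega) hk2)

-- Main invariant lemma: A's fold from index j onward, with the current group's head at
-- start (all elements of [start, j) equal to the head), equals Source B's outer loop.
lemma pvMain (s d : List Int) (n : Int) :
    ∀ (m : Nat) (j start : Int) (g : List (Int × Int)), (n - j).toNat = m →
      start < j → j ≤ n →
      (∀ k, start ≤ k → k < j → pvCond s d start k = true) →
      (let r := (PySem.List.pyRange j n 1).foldl
          (fun (acc : List (Int × Int) × Int) i =>
            if (PySem.List.pyGet? s i != PySem.List.pyGet? s (i - 1)) ||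
               (PySem.List.pyGet? d i != PySem.List.pyGet? d (i - 1)) then
              (acc.1 ++ [(acc.2, i)], i)
            else acc) (g, start)
       r.1 ++ [(r.2, n)]) = pvOuter s d n g start := by
  intro m
  induction m using Nat.strong_induction_on with
  | _ m ih =>
    intro j start g hm hsj hjn hinv
    rcases eq_or_lt_of_le hjn with hje | hjlt
    · -- j = n : range is empty, pvInner runs to n and stops
      subst hje
      have hskip : pvInner s d j start (start + 1) = pvInner s d j start j :=
        pvInner_skip s d j start (j - (start + 1)).toNat (start + 1) j rfl (by omega)
          (fun k hk1 hk2 => ⟨by omega, hinv k (by omega) hk2⟩)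
      have hend : pvInner s d j start j = j := by rw [pvInner, dif_neg (by omega)]
      rw [pvOuter]
      rw [hskip, hend, if_pos (le_refl j : j ≥ j)]
      simp [PySem.List.pyRange]
    · -- j < n : peel index j off the range
      have hcons := PySem.List.pyRange_one_cons (a := j) (b := n) hjlt
      -- the head-equality invariant at k = j - 1
      have hprev := hinv (j - 1) (by omega) (by omega)
      unfold pvCond at hprev
      have hps : PySem.List.pyGet? s (j - 1) = PySem.List.pyGet? s start :=
        eq_of_beq (by simpa using (Bool.and_elim_left hprev))
      have hpd : PySem.List.pyGet? d (j - 1) = PySem.List.pyGet? d start :=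
        eq_of_beq (by simpa using (Bool.and_elim_right hprev))
      by_cases hc : pvCond s d start j = true
      · -- no boundary at j: A's acc unchanged, extend the invariant to j + 1
        have hchanged :
            ((PySem.List.pyGet? s j != PySem.List.pyGet? s (j - 1)) ||
             (PySem.List.pyGet? d j != PySem.List.pyGet? d (j - 1))) = false := by
          unfold pvCond at hc
          rw [hps, hpd]
          simp only [bne, Bool.or_eq_false_iff, Bool.not_eq_eq_eq_not, Bool.not_false] at *
          exact ⟨(Bool.and_elim_left hc), (Bool.and_elim_right hc)⟩
        rw [hcons]
        simp only [List.foldl_cons, hchanged, Bool.false_eq_true, if_false]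
        exact ih (n - (j + 1)).toNat (by omega) (j + 1) start g rfl (by omega) (by omega)
          (fun k hk1 hk2 => by
            rcases lt_or_ge k j with h | h
            · exact hinv k hk1 h
            · have : k = j := by omega
              rw [this]; exact hc)
      · -- boundary at j: A appends (start, j); Source B's inner loop also stops at j
        have hc' : pvCond s d start j = false := by
          cases hcb : pvCond s d start j
          · rfl
          · exact absurd hcb hc
        have hchanged :
            ((PySem.List.pyGet? s j != PySem.List.pyGet? s (j - 1)) ||
             (PySem.List.pyGet? d j != PySem.List.pyGet? d (j - 1))) = true := by
          unfold pvCond at hc'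
          rw [hps, hpd]
          simp only [bne, Bool.and_eq_false_iff] at *
          rcases hc' with h | h <;> simp [h]
        have hskip : pvInner s d n start (start + 1) = pvInner s d n start j :=
          pvInner_skip s d n start (j - (start + 1)).toNat (start + 1) j rfl (by omega)
            (fun k hk1 hk2 => ⟨by omega, hinv k (by omega) hk2⟩)
        have hstop : pvInner s d n start j = j := by
          rw [pvInner, dif_pos hjlt]
          unfold pvCond at hc'
          rw [if_neg (by simp [hc'])]
        rw [pvOuter]
        simp only [hskip, hstop]
        rw [if_neg (by omega)]
        rw [hcons]
        simp only [List.foldl_cons, hchanged, if_true]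
        exact ih (n - (j + 1)).toNat (by omega) (j + 1) j (g ++ [(start, j)]) rfl (by omega)
          (by omega)
          (fun k hk1 hk2 => by
            have : k = j := by omega
            rw [this]; unfold pvCond; simp)

-- ===== VERDICT (by name: the statement is the Claim_ definition above) =====
theorem find_sequence_groups_spec : Claim_equal_find_sequence_groups := by
  intro s d _ _
  show find_sequence_groups s d = find_sequence_groups_alt s d
  unfold find_sequence_groups find_sequence_groups_alt
  rcases Nat.eq_zero_or_pos s.length with h0 | hpos
  · -- empty symbol list: both sides compute to [(0, 0)]
    rw [h0]
    simp only [Nat.cast_zero]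
    have hi : pvInner s d 0 0 (0 + 1) = 1 := by rw [pvInner]; norm_num
    rw [pvOuter, hi, if_pos (by norm_num : (1 : Int) ≥ 0)]
    simp [PySem.List.pyRange]
  · have h1 : (1 : Int) ≤ (s.length : Int) := by exact_mod_cast hpos
    have := pvMain s d (s.length : Int) ((s.length : Int) - 1).toNat 1 0 [] rfl (by omega) h1
      (fun k hk1 hk2 => by
        have : k = 0 := by omega
        rw [this]; unfold pvCond; simp)
    exact this
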